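-- pv_equiv track=rewrite | github.com/quepas/advent-of-code | 2024/19/run.py | prepare_prefix_map
-- ===== SOURCE A (Python) =====
-- PrefixMap = dict[int, list[str]]
--
-- def prepare_prefix_map(design: str, towels: list[str]) -> PrefixMap:
--     towels = sorted(towels)
--     prefix_map = {}
--     next_i = 0
--     for i in range(len(design)):
--         if i < next_i:
--             continue
--         for towel in towels:
--             if design[i:].startswith(towel):
--                 if i in prefix_map:
--                     prefix_map[i].append(towel)
--                 else:
--                     prefix_map[i] = [towel]
--         if i in prefix_map:
--             min_prefix = min(map(len, prefix_map[i]))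
--             next_i += min_prefix
--
--
--     return prefix_map
-- ===== SOURCE B (Python) =====
-- def _insert(root, towel):
--     node = root
--     for ch in towel:
--         node = node[0].setdefault(ch, [{}, 0])
--     node[1] += 1
--
--
-- def _walk(node, pref, rest):
--     out = [pref] * node[1]
--     if rest and rest[0] in node[0]:
--         out += _walk(node[0][rest[0]], pref + rest[0], rest[1:])
--     return out
--
--
-- def prepare_prefix_map(design, towels):
--     root = [{}, 0]
--     for t in towels:
--         _insert(root, t)
--     prefix_map = {}
--     next_i = 0
--     for i in range(len(design)):
--         if i < next_i:
--             continue
--         matches = _walk(root, "", design[i:])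
--         if matches:
--             prefix_map[i] = matches
--             next_i += len(matches[0])
--     return prefix_map
-- ===== Notes on version B (the rewrite author's own statement) =====
-- stated objective: faster
-- what changed: A sorts the towels and, at each unskipped position, scans the whole towel list testing startswith; B never sorts: it builds a character trie of the towels once and at each position walks the trie along design[i:], emitting the matches (shortest first, which coincides with sorted order since all matches are prefixes of the same suffix), so the per-position cost drops from T*L startswith tests to one walk of at most len(design)-i trie edges.
import Mathlib
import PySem

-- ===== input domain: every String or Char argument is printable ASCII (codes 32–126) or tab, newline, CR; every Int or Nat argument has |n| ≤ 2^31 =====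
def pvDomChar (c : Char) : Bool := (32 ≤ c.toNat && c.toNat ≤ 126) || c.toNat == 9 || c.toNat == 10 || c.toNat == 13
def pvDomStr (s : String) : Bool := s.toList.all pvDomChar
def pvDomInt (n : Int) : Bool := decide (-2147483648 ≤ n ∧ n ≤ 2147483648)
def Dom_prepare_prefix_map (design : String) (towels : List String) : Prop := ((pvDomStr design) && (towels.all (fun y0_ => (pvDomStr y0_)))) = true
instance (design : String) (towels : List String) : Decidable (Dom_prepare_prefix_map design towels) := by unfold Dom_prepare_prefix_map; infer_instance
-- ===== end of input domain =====

-- B replaces A's sort + per-position scan of the whole towel list by a character trie of the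
-- towels, walked once along design[i:] at each unskipped position; objective: faster.

-- ===== PORT A =====
-- literal port of A: sort towels, fold over range(len(design)) carrying (prefix_map, next_i),
-- inner fold over towels appending each matching towel into prefix_map[i]
def prepare_prefix_map (design : String) (towels : List String) : List (Int × List String) :=
  let ts := PySem.List.sorted towels (fun x => x) false
  let d := design.toList
  let st :=
    (PySem.List.pyRange 0 (d.length : Int)).foldl
      (fun st i =>
        if i < st.2 then st
        else
          let pm := ts.foldl
            (fun pm towel =>
              if PySem.Chars.startswith (PySem.List.slice d (some i) none) towel.toList then
                if pm.contains i then pm.modify i [] (fun v => v ++ [towel])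
                else pm.insert i [towel]
              else pm) st.1
          if pm.contains i then
            (pm, st.2 + ((PySem.List.min? ((pm.getD i []).map (fun t => (PySem.Str.len t : Int))) (fun x => x)).getD 0))
          else (pm, st.2))
      (PySem.Dict.empty, (0 : Int))
  st.1.items

-- ===== PORT B =====
-- trie node: count of towels ending here, plus an ordered child list (Python's dict-of-dicts
-- node [{}, 0]; an explicit child-list type instead of a nested inductive)
mutual
inductive PTrie : Type
  | node : Nat → PChildren → PTrie
inductive PChildren : Type
  | nil : PChildren
  | cons : Char → PTrie → PChildren → PChildren
end

-- children[c] lookup (Python: node[0].get / 'in' test)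
def childGet : PChildren → Char → Option PTrie
  | .nil, _ => none
  | .cons c0 t0 rest, c => if c = c0 then some t0 else childGet rest c

-- children[c] = t, keeping insertion order (Python: setdefault's write-back)
def childSet : PChildren → Char → PTrie → PChildren
  | .nil, c, t => .cons c t .nil
  | .cons c0 t0 rest, c, t => if c = c0 then .cons c0 t rest else .cons c0 t0 (childSet rest c t)

-- _insert: descend along the towel's characters creating nodes, bump the final count
def trieInsert : List Char → PTrie → PTrie
  | [], .node cnt ch => .node (cnt + 1) ch
  | c :: cs, .node cnt ch =>
      .node cnt (childSet ch c (trieInsert cs ((childGet ch c).getD (.node 0 .nil))))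

-- _walk: emit the node's count copies of the prefix built so far, then descend on the next char
def trieWalk : List Char → PTrie → List Char → List String
  | [], .node cnt _, pref => List.replicate cnt (String.ofList pref)
  | c :: rs, .node cnt ch, pref =>
      List.replicate cnt (String.ofList pref) ++
        (match childGet ch c with
         | none => []
         | some sub => trieWalk rs sub (pref ++ [c]))

def trieBuild (towels : List String) : PTrie :=
  towels.foldl (fun tr t => trieInsert t.toList tr) (.node 0 .nil)

def prepare_prefix_map_alt (design : String) (towels : List String) : List (Int × List String) :=
  let root := trieBuild towels
  let d := design.toList
  let st :=
    (PySem.List.pyRange 0 (d.length : Int)).foldl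
      (fun st i =>
        if i < st.2 then st
        else
          match trieWalk (PySem.List.slice d (some i) none) root [] with
          | [] => st
          | m :: rest => (st.1.insert i (m :: rest), st.2 + (PySem.Str.len m : Int)))
      (PySem.Dict.empty, (0 : Int))
  st.1.items

-- ===== PRECONDITION & SPEC =====
def Spec_prepare_prefix_map (design : String) (towels : List String) (out : List (Int × List String)) : Prop := out = prepare_prefix_map_alt design towels
instance (design : String) (towels : List String) (out : List (Int × List String)) : Decidable (Spec_prepare_prefix_map design towels out) := by unfold Spec_prepare_prefix_map; infer_instance

-- ===== CLAIM =====
def Claim_equal_prepare_prefix_map : Prop := ∀ (design : String) (towels : List String), Dom_prepare_prefix_map design towels → Spec_prepare_prefix_map design towels (prepare_prefix_map design towels)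

-- ===== LEMMAS AND PROOFS =====

-- A's loop body, named for the proofs (definitionally the lambda inside prepare_prefix_map)
def ppmStep (d : List Char) (ts : List String)
    (st : PySem.Dict Int (List String) × Int) (i : Int) :
    PySem.Dict Int (List String) × Int :=
  if i < st.2 then st
  else
    let pm := ts.foldl
      (fun pm towel =>
        if PySem.Chars.startswith (PySem.List.slice d (some i) none) towel.toList then
          if pm.contains i then pm.modify i [] (fun v => v ++ [towel])
          else pm.insert i [towel]
        else pm) st.1
    if pm.contains i then
      (pm, st.2 + ((PySem.List.min? ((pm.getD i []).map (fun t => (PySem.Str.len t : Int))) (fun x => x)).getD 0))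
    else (pm, st.2)

-- B's loop body, named for the proofs
def bStep (d : List Char) (root : PTrie)
    (st : PySem.Dict Int (List String) × Int) (i : Int) :
    PySem.Dict Int (List String) × Int :=
  if i < st.2 then st
  else
    match trieWalk (PySem.List.slice d (some i) none) root [] with
    | [] => st
    | m :: rest => (st.1.insert i (m :: rest), st.2 + (PySem.Str.len m : Int))

lemma ppm_A_eq (design : String) (towels : List String) :
    prepare_prefix_map design towels =
      ((PySem.List.pyRange 0 (design.toList.length : Int)).foldl
        (ppmStep design.toList (PySem.List.sorted towels (fun x => x) false))
        (PySem.Dict.empty, (0 : Int))).1.items := rfl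

lemma ppm_B_eq (design : String) (towels : List String) :
    prepare_prefix_map_alt design towels =
      ((PySem.List.pyRange 0 (design.toList.length : Int)).foldl
        (bStep design.toList (trieBuild towels))
        (PySem.Dict.empty, (0 : Int))).1.items := rfl

-- A's inner towel loop, once i is present: appends the remaining ms
lemma ppm_inner_aux (d : List Char) (i : Int) (l : List String)
    (pm : PySem.Dict Int (List String)) (acc : List String) :
    l.foldl
      (fun pm towel =>
        if PySem.Chars.startswith (PySem.List.slice d (some i) none) towel.toList then
          if pm.contains i then pm.modify i [] (fun v => v ++ [towel])
          else pm.insert i [towel]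
        else pm) (pm.insert i acc)
    = pm.insert i
        (acc ++ l.filter (fun t => PySem.Chars.startswith (PySem.List.slice d (some i) none) t.toList)) := by
  induction l generalizing acc with
  | nil => simp
  | cons t l ih =>
    by_cases hp : PySem.Chars.startswith (PySem.List.slice d (some i) none) t.toList = true
    · simp only [List.foldl_cons]
      rw [if_pos hp, if_pos (PySem.Dict.contains_insert_self pm i acc)]
      rw [show (pm.insert i acc).modify i [] (fun v => v ++ [t]) = pm.insert i (acc ++ [t]) from by
        simp [PySem.Dict.modify, PySem.Dict.getD_insert_self, PySem.Dict.insert_insert_self]]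
      rw [ih (acc ++ [t])]
      simp [hp]
    · simp only [List.foldl_cons, hp]
      rw [if_neg (by simp)]
      rw [ih acc]
      simp [hp]

-- A's inner towel loop from a dict not containing i: inserts the whole filtered list (if any)
lemma ppm_inner (d : List Char) (i : Int) (l : List String)
    (pm : PySem.Dict Int (List String)) (h : pm.contains i = false) :
    l.foldl
      (fun pm towel =>
        if PySem.Chars.startswith (PySem.List.slice d (some i) none) towel.toList then
          if pm.contains i then pm.modify i [] (fun v => v ++ [towel])
          else pm.insert i [towel]
        else pm) pm
    = (if l.filter (fun t => PySem.Chars.startswith (PySem.List.slice d (some i) none) t.toList) = []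
       then pm
       else pm.insert i (l.filter (fun t => PySem.Chars.startswith (PySem.List.slice d (some i) none) t.toList))) := by
  induction l with
  | nil => simp
  | cons t l ih =>
    by_cases hp : PySem.Chars.startswith (PySem.List.slice d (some i) none) t.toList = true
    · simp only [List.foldl_cons, hp, if_true, h, if_false, Bool.false_eq_true]
      rw [ppm_inner_aux]
      simp [hp]
    · simp only [List.foldl_cons, hp]
      rw [if_neg (by simp)]
      rw [ih]
      simp [hp]

-- one step of A's outer loop at an unskipped, fresh position
lemma ppm_step_eq (d : List Char) (ts : List String) (i nxt : Int)
    (pm : PySem.Dict Int (List String)) (h : pm.contains i = false) (hge : ¬ i < nxt) :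
    ppmStep d ts (pm, nxt) i =
      (if ts.filter (fun t => PySem.Chars.startswith (PySem.List.slice d (some i) none) t.toList) = []
       then (pm, nxt)
       else
        (pm.insert i (ts.filter (fun t => PySem.Chars.startswith (PySem.List.slice d (some i) none) t.toList)),
         nxt + ((PySem.List.min?
            ((ts.filter (fun t => PySem.Chars.startswith (PySem.List.slice d (some i) none) t.toList)).map
              (fun t => (PySem.Str.len t : Int))) (fun x => x)).getD 0))) := by
  unfold ppmStep
  rw [if_neg hge]
  simp only []
  rw [ppm_inner d i ts pm h]
  by_cases hf : ts.filter (fun t => PySem.Chars.startswith (PySem.List.slice d (some i) none) t.toList) = []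
  · simp [hf, h]
  · rw [if_neg hf, if_neg hf]
    rw [if_pos (PySem.Dict.contains_insert_self pm i _)]
    rw [PySem.Dict.getD_insert_self]

-- ------- trie counting, walk characterisation, order facts -------

-- number of towels stored in the trie under exactly the key p
def countT : List Char → PTrie → Nat
  | [], .node cnt _ => cnt
  | c :: p, .node _ ch =>
    match childGet ch c with
    | none => 0
    | some sub => countT p sub

lemma childGet_childSet : ∀ (ch : PChildren) (c c' : Char) (t : PTrie),
    childGet (childSet ch c t) c' = if c' = c then some t else childGet ch c'
  | .nil, c, c', t => by by_cases h : c' = c <;> simp [childSet, childGet, h]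
  | .cons c0 t0 rest, c, c', t => by
    by_cases h0 : c = c0
    · subst h0
      by_cases h : c' = c <;> simp [childSet, childGet, h]
    · by_cases h : c' = c0
      · subst h
        simp [childSet, childGet, h0, Ne.symm h0]
      · simp [childSet, childGet, h0, h, childGet_childSet rest c c' t]

lemma countT_nilTrie (q : List Char) : countT q (.node 0 .nil) = 0 := by
  cases q <;> simp [countT, childGet]

lemma countT_insert (t : List Char) (p : List Char) (tr : PTrie) :
    countT p (trieInsert t tr) = countT p tr + (if p = t then 1 else 0) := by
  induction t generalizing p tr with
  | nil =>
    obtain ⟨cnt, ch⟩ := tr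
    cases p with
    | nil => simp [trieInsert, countT]
    | cons c q => simp [trieInsert, countT]
  | cons c cs ih =>
    obtain ⟨cnt, ch⟩ := tr
    cases p with
    | nil => simp [trieInsert, countT]
    | cons c' q =>
      simp only [trieInsert, countT, childGet_childSet]
      by_cases hc : c' = c
      · subst hc
        cases hg : childGet ch c' with
        | none => simp [ih, countT_nilTrie]
        | some sub => simp [ih]
      · simp [hc]

lemma countT_build (towels : List String) (p : List Char) :
    countT p (trieBuild towels) = (towels.filter (fun t => t.toList = p)).length := by
  have aux : ∀ (l : List String) (tr : PTrie),
      countT p (l.foldl (fun tr t => trieInsert t.toList tr) tr)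
        = countT p tr + (l.filter (fun t => t.toList = p)).length := by
    intro l
    induction l with
    | nil => intro tr; simp
    | cons t l ih =>
      intro tr
      rw [List.foldl_cons, ih, countT_insert]
      by_cases h : t.toList = p
      · subst h
        simp
        omega
      · simp [h]
        exact fun hpt => h hpt.symm
  rw [trieBuild, aux, countT_nilTrie]
  omega

lemma trieWalk_spec (cs : List Char) (tr : PTrie) (pref : List Char) :
    trieWalk cs tr pref
      = (List.range (cs.length + 1)).flatMap
          (fun k => List.replicate (countT (cs.take k) tr) (String.ofList (pref ++ cs.take k))) := by
  induction cs generalizing tr pref with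
  | nil =>
    obtain ⟨cnt, ch⟩ := tr
    simp [trieWalk, countT]
  | cons c rs ih =>
    obtain ⟨cnt, ch⟩ := tr
    rw [List.length_cons, List.range_succ_eq_map, List.flatMap_cons, List.flatMap_map]
    simp only [List.take_zero, List.take_succ_cons, List.append_nil]
    cases hg : childGet ch c with
    | none =>
      simp [trieWalk, hg, countT]
    | some sub =>
      simp only [trieWalk, hg, countT]
      rw [ih sub (pref ++ [c])]
      simp

lemma prefix_le_chars (p q : List Char) (h : p <+: q) : p ≤ q := by
  rcases h with ⟨r, rfl⟩
  cases r with
  | nil => simp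
  | cons c cs =>
    apply le_of_lt
    show List.Lex (· < ·) p (p ++ c :: cs)
    induction p with
    | nil => exact List.Lex.nil
    | cons a as ih => exact List.Lex.cons ih

lemma string_le_of_toList_le (s t : String) (h : s.toList ≤ t.toList) : s ≤ t := by
  rcases lt_or_eq_of_le h with h' | h'
  · exact le_of_lt (String.lt_iff_toList_lt.mpr h')
  · exact le_of_eq (String.toList_inj.mp h')

lemma pairwise_flatMap_replicate {β : Type} (R : β → β → Prop) (n : Nat) (g : Nat → β) (c : Nat → Nat)
    (hR : ∀ j k, j ≤ k → R (g j) (g k)) :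
    ((List.range n).flatMap (fun k => List.replicate (c k) (g k))).Pairwise R := by
  induction n with
  | zero => simp
  | succ n ih =>
    rw [List.range_succ, List.flatMap_append, List.flatMap_singleton]
    rw [List.pairwise_append]
    refine ⟨ih, List.pairwise_replicate.mpr (Or.inr (hR n n le_rfl)), ?_⟩
    intro x hx y hy
    rw [List.mem_flatMap] at hx
    obtain ⟨k, hk, hxk⟩ := hx
    rw [List.mem_range] at hk
    rw [List.eq_of_mem_replicate hxk, List.eq_of_mem_replicate hy]
    exact hR k n (Nat.le_of_lt hk)

lemma count_flatMap_eq {β : Type} [BEq β] (l : List Nat) (f : Nat → List β) (b : β) :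
    (l.flatMap f).count b = (l.map (fun k => (f k).count b)).sum := by
  induction l with
  | nil => simp
  | cons k l ih => simp [List.flatMap_cons, List.count_append, ih]

lemma sum_take_ite (cs w : List Char) (c : Nat → Nat) :
    ∀ n, n ≤ cs.length + 1 →
      ((List.range n).map (fun k => if cs.take k = w then c k else 0)).sum
        = if w <+: cs ∧ w.length < n then c w.length else 0 := by
  intro n
  induction n with
  | zero => simp
  | succ n ih =>
    intro hn
    rw [List.range_succ, List.map_append, List.sum_append]
    rw [ih (by omega)]
    simp only [List.map_cons, List.map_nil, List.sum_cons, List.sum_nil]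
    by_cases h : cs.take n = w
    · have hw : w.length = n := by
        rw [← h, List.length_take]; omega
      have hpre : w <+: cs := h ▸ List.take_prefix n cs
      rw [if_neg (by omega), if_pos h, if_pos ⟨hpre, by omega⟩]
      rw [hw]; omega
    · rw [if_neg h]
      by_cases hc : w <+: cs ∧ w.length < n
      · rw [if_pos hc, if_pos ⟨hc.1, by omega⟩]; omega
      · have hne : ¬ (w <+: cs ∧ w.length < n + 1) := by
          rintro ⟨hpre, hlt⟩
          rcases Nat.lt_or_ge w.length n with h1 | h1
          · exact hc ⟨hpre, h1⟩
          · have hwl : w.length = n := by omega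
            exact h (by rw [← hwl]; exact (List.prefix_iff_eq_take.mp hpre).symm)
        rw [if_neg hc, if_neg hne]
        omega

lemma walk_count (cs : List Char) (towels : List String) (s : String) :
    (trieWalk cs (trieBuild towels) []).count s
      = (towels.filter (fun t => PySem.Chars.startswith cs t.toList)).count s := by
  rw [trieWalk_spec]
  simp only [List.nil_append]
  rw [count_flatMap_eq]
  have hterm : ∀ k, (List.replicate (countT (cs.take k) (trieBuild towels)) (String.ofList (cs.take k))).count s
      = (if cs.take k = s.toList then countT s.toList (trieBuild towels) else 0) := by
    intro k
    rw [List.count_replicate]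
    by_cases h : cs.take k = s.toList
    · rw [if_pos (by rw [h, String.ofList_toList]; simp), if_pos h, h]
    · rw [if_neg ?_, if_neg h]
      intro hb
      apply h
      have := beq_iff_eq.mp hb
      rw [← this, String.toList_ofList]
  simp only [hterm]
  rw [sum_take_ite cs s.toList (fun _ => countT s.toList (trieBuild towels)) (cs.length + 1) le_rfl]
  by_cases hp : s.toList <+: cs
  · rw [if_pos ⟨hp, by have := hp.length_le; omega⟩, countT_build, List.count_eq_length_filter,
      List.filter_filter]
    congr 1
    apply List.filter_congr
    intro t _
    show decide (t.toList = s.toList) = ((t == s) && PySem.Chars.startswith cs t.toList)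
    by_cases hts : t = s
    · subst hts
      simp [PySem.Chars.startswith_iff, hp]
    · have h1 : (t == s) = false := beq_eq_false_iff_ne.mpr hts
      have h2 : t.toList ≠ s.toList := fun hh => hts (String.toList_inj.mp hh)
      simp [h1, h2]
  · rw [if_neg (by tauto)]
    symm
    rw [List.count_eq_zero]
    intro hmem
    rw [List.mem_filter] at hmem
    exact hp ((PySem.Chars.startswith_iff _ _).mp hmem.2)

lemma walk_le_pairwise (cs : List Char) (towels : List String) :
    (trieWalk cs (trieBuild towels) []).Pairwise (fun a b => a ≤ b) := by
  rw [trieWalk_spec]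
  simp only [List.nil_append]
  apply pairwise_flatMap_replicate
  intro j k hjk
  apply string_le_of_toList_le
  rw [String.toList_ofList, String.toList_ofList]
  exact prefix_le_chars _ _ (List.take_prefix_take_left hjk)

lemma walk_len_pairwise (cs : List Char) (towels : List String) :
    (trieWalk cs (trieBuild towels) []).Pairwise
      (fun a b => (PySem.Str.len a : Int) ≤ (PySem.Str.len b : Int)) := by
  rw [trieWalk_spec]
  simp only [List.nil_append]
  apply pairwise_flatMap_replicate
  intro j k hjk
  have := (List.take_prefix_take_left (l := cs) hjk).length_le
  simp [PySem.Str.len_eq]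
  omega

lemma walk_eq_filter_sorted (cs : List Char) (towels : List String) :
    trieWalk cs (trieBuild towels) []
      = (PySem.List.sorted towels (fun x => x) false).filter
          (fun t => PySem.Chars.startswith cs t.toList) := by
  apply PySem.List.eq_of_perm_of_pairwise_le_of_injective (fun x : String => x)
    Function.injective_id
  · rw [List.perm_iff_count]
    intro s
    rw [walk_count]
    exact (List.Perm.filter _ (PySem.List.sorted_perm towels (fun x => x) false)).count_eq s |>.symm
  · exact walk_le_pairwise cs towels
  · exact (PySem.List.sorted_pairwise towels (fun x => x)).filter _

lemma min?_head_of_pairwise (x : Int) (xs : List Int) (h : ∀ y ∈ xs, x ≤ y) :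
    PySem.List.min? (x :: xs) (fun v => v) = some x := by
  cases hm : PySem.List.min? (x :: xs) (fun v => v) with
  | none => exact absurd ((PySem.List.min?_eq_none_iff _ _).mp hm) (by simp)
  | some m =>
    have hmem := PySem.List.min?_mem hm
    have hmin := PySem.List.min?_isMin hm x (by simp)
    have hxm : x ≤ m := by
      rcases List.mem_cons.mp hmem with rfl | hmm
      · exact le_refl _
      · exact h m hmm
    rw [le_antisymm hmin hxm]

-- ------- main fold equality -------

-- one unskipped step: A's filtered scan and B's trie walk produce the same state
lemma step_eq (d : List Char) (towels : List String) (i nxt : Int)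
    (pm : PySem.Dict Int (List String)) (h : pm.contains i = false) :
    ppmStep d (PySem.List.sorted towels (fun x => x) false) (pm, nxt) i
      = bStep d (trieBuild towels) (pm, nxt) i := by
  by_cases hskip : i < nxt
  · unfold ppmStep bStep
    rw [if_pos hskip, if_pos hskip]
  · rw [ppm_step_eq d _ i nxt pm h hskip]
    unfold bStep
    rw [if_neg hskip]
    rw [walk_eq_filter_sorted (PySem.List.slice d (some i) none) towels]
    cases hf : (PySem.List.sorted towels (fun x => x) false).filter
        (fun t => PySem.Chars.startswith (PySem.List.slice d (some i) none) t.toList) with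
    | nil => simp
    | cons m rest =>
      rw [if_neg (by simp)]
      simp only [List.map_cons]
      have hpw := walk_len_pairwise (PySem.List.slice d (some i) none) towels
      rw [walk_eq_filter_sorted, hf, List.pairwise_cons] at hpw
      rw [min?_head_of_pairwise ((PySem.Str.len m : Int)) (rest.map (fun t => (PySem.Str.len t : Int)))
        (by
          intro y hy
          rw [List.mem_map] at hy
          obtain ⟨t, ht, rfl⟩ := hy
          exact hpw.1 t ht)]
      rfl

lemma fold_eq (d : List Char) (towels : List String) :
    ∀ (k : Nat) (i nxt : Int) (pm : PySem.Dict Int (List String)),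
      0 ≤ i →
      ((d.length : Int) - i).toNat ≤ k →
      (∀ j : Int, i ≤ j → pm.contains j = false) →
      (PySem.List.pyRange i (d.length : Int)).foldl
          (ppmStep d (PySem.List.sorted towels (fun x => x) false)) (pm, nxt)
        = (PySem.List.pyRange i (d.length : Int)).foldl (bStep d (trieBuild towels)) (pm, nxt) := by
  intro k
  induction k with
  | zero =>
    intro i nxt pm hi hk hpm
    rw [show PySem.List.pyRange i (d.length : Int) = [] from by
      simp [PySem.List.pyRange]; omega]
    rfl
  | succ k ih =>
    intro i nxt pm hi hk hpm
    by_cases hlt : i < (d.length : Int)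
    · rw [PySem.List.pyRange_one_cons hlt, List.foldl_cons, List.foldl_cons]
      rw [step_eq d towels i nxt pm (hpm i le_rfl)]
      rcases hb : bStep d (trieBuild towels) (pm, nxt) i with ⟨pm', nxt'⟩
      apply ih (i + 1) nxt' pm' (by omega) (by omega)
      intro j hj
      unfold bStep at hb
      by_cases hskip : i < nxt
      · rw [if_pos hskip] at hb
        cases hb
        exact hpm j (by omega)
      · rw [if_neg hskip] at hb
        cases hw : trieWalk (PySem.List.slice d (some i) none) (trieBuild towels) [] with
        | nil =>
          rw [hw] at hb
          cases hb
          exact hpm j (by omega)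
        | cons m rest =>
          rw [hw] at hb
          simp only at hb
          cases hb
          rw [PySem.Dict.contains_insert]
          have : (j == i) = false := by simp; omega
          rw [this]
          simp [hpm j (by omega)]
    · rw [show PySem.List.pyRange i (d.length : Int) = [] from by
        simp [PySem.List.pyRange]; omega]
      rfl

-- ===== VERDICT =====
theorem prepare_prefix_map_spec : Claim_equal_prepare_prefix_map := by
  intro design towels _
  unfold Spec_prepare_prefix_map
  rw [ppm_A_eq, ppm_B_eq]
  rw [fold_eq design.toList towels design.toList.length 0 0 PySem.Dict.empty
    le_rfl (by omega) (fun j _ => PySem.Dict.contains_empty j)]
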